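-- pv_equiv track=rewrite | github.com/Vishwa-247/agentic-studymate | backend/api-gateway/main.py | deduplicate_jobs
-- ===== SOURCE A (Python) =====
-- def deduplicate_jobs(results: list) -> list:
--     """Remove duplicates by URL domain+path, prefer job board sources."""
--     seen_urls = set()
--     unique = []
--     # Job boards get priority
--     job_board_domains = {"linkedin.com", "indeed.com", "glassdoor.com", "wellfound.com",
--                          "naukri.com", "monster.com", "dice.com", "ziprecruiter.com",
--                          "lever.co", "greenhouse.io", "workday.com", "careers"}
--
--     def domain_priority(url: str) -> int:
--         return 0 if any(d in url.lower() for d in job_board_domains) else 1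
--
--     # Sort: job boards first
--     results.sort(key=lambda r: domain_priority(r.get("url", "")))
--
--     for r in results:
--         url = r.get("url", "").split("?")[0].rstrip("/").lower()
--         if url and url not in seen_urls:
--             seen_urls.add(url)
--             unique.append(r)
--     return unique
-- ===== SOURCE B (Python) =====
-- # Two staged filter passes (boards, others) instead of sorting, and dedup via a
-- # dict keyed by normalized URL (first occurrence wins) whose values are returned.
-- # Note: unlike A, B does not mutate `results` in place (A sorts it); the RETURN value is identical.
-- def deduplicate_jobs(results: list) -> list:
--     job_board_domains = ("linkedin.com", "indeed.com", "glassdoor.com", "wellfound.com",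
--                          "naukri.com", "monster.com", "dice.com", "ziprecruiter.com",
--                          "lever.co", "greenhouse.io", "workday.com", "careers")
--
--     def is_board(r):
--         low = r.get("url", "").lower()
--         return any(d in low for d in job_board_domains)
--
--     boards = [r for r in results if is_board(r)]
--     others = [r for r in results if not is_board(r)]
--
--     first = {}
--     for r in boards + others:
--         k = r.get("url", "").split("?")[0].rstrip("/").lower()
--         if k and k not in first:
--             first[k] = r
--     return list(first.values())
-- ===== Notes on version B (the rewrite author's own statement) =====
-- stated objective: alternative
-- what changed: Replaces the stable sort by the 0/1 priority key with two staged filter passes (job-board records first, then the rest) and replaces the seen-set-plus-output-list dedup with a dict keyed by the normalized URL whose first-inserted values are returned; B also does not mutate the input list, which A sorts in place.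
import Mathlib
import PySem

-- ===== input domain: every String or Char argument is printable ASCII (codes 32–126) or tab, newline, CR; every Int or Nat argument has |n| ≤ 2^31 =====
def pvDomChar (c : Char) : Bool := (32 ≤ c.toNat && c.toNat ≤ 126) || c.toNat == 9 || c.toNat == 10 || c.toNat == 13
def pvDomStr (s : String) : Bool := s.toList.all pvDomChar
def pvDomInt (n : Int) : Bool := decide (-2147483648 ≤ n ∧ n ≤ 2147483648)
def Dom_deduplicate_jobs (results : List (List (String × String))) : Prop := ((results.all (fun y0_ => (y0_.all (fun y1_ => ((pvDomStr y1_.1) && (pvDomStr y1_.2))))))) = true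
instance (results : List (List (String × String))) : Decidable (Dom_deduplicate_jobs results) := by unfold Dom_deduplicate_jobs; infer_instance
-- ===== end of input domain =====

-- B replaces A's stable sort by the 0/1 priority key with two staged filter passes
-- (job-board records first, then the rest) and replaces A's seen-set + output-list dedup with a
-- dict keyed by the normalized URL, returning its values (objective: alternative, same return value).
-- A sorts `results` in place; B does not — the equivalence proved here is about the RETURN value.

-- ===== PORT A =====
-- shared text constants and helpers (both Pythons contain this same code)
def pvJobBoardDomains : List String :=
  ["linkedin.com", "indeed.com", "glassdoor.com", "wellfound.com",
   "naukri.com", "monster.com", "dice.com", "ziprecruiter.com",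
   "lever.co", "greenhouse.io", "workday.com", "careers"]

-- r.get("url", "") : Dict lookup (first match) on the association-list record
def pvGetUrl (r : List (String × String)) : String := PySem.Dict.getD ⟨r⟩ "url" ""

-- domain_priority(url): 0 if any job-board domain is a substring of url.lower() else 1
def pvPrio (url : String) : Int :=
  if pvJobBoardDomains.any (fun d => PySem.Str.isIn d (PySem.Str.lower url)) then 0 else 1

-- url.split("?")[0] : exact hand port — everything before the first '?'
-- .rstrip("/")      : exact hand port — drop trailing '/' characters
-- .lower()          : PySem.Chars.lower; the key is kept as List Char (string equality = char-list equality)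
def pvNorm (url : String) : List Char :=
  PySem.Chars.lower (((url.toList.takeWhile (· ≠ '?')).reverse.dropWhile (· == '/')).reverse)

-- A: sort by priority (stable), then one dedup pass carrying (seen-set, output-list)
def deduplicate_jobs (results : List (List (String × String))) : List (List (String × String)) :=
  let sortedResults := PySem.List.sorted results (fun r => pvPrio (pvGetUrl r))
  (sortedResults.foldl
    (fun (st : PySem.Set (List Char) × List (List (String × String))) r =>
      let url := pvNorm (pvGetUrl r)
      if url ≠ [] ∧ ¬ st.1.contains url = true then (st.1.add url, st.2 ++ [r]) else st)
    (PySem.Set.empty, [])).2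

-- ===== PORT B =====
-- B: two staged filter passes (boards, then others), then a dict of first records per key
def deduplicate_jobs_alt (results : List (List (String × String))) : List (List (String × String)) :=
  let boards := results.filter (fun r => pvPrio (pvGetUrl r) == 0)
  let others := results.filter (fun r => !(pvPrio (pvGetUrl r) == 0))
  let first := (boards ++ others).foldl
    (fun (d : PySem.Dict (List Char) (List (String × String))) r =>
      let k := pvNorm (pvGetUrl r)
      if k ≠ [] ∧ ¬ d.contains k = true then d.insert k r else d)
    PySem.Dict.empty
  first.values

-- ===== PRECONDITION & SPEC =====
def Spec_deduplicate_jobs (results : List (List (String × String))) (out : List (List (String × String))) : Prop := out = deduplicate_jobs_alt results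
instance (results : List (List (String × String))) (out : List (List (String × String))) : Decidable (Spec_deduplicate_jobs results out) := by unfold Spec_deduplicate_jobs; infer_instance

-- ===== CLAIM (what is proved, stated in full; the proofs are below) =====
def Claim_equal_deduplicate_jobs : Prop := ∀ (results : List (List (String × String))), Dom_deduplicate_jobs results → Spec_deduplicate_jobs results (deduplicate_jobs results)

-- ===== LEMMAS AND PROOFS =====

-- insertBy lands exactly between a prefix it is not `before` and a suffix it is `before`
theorem pv_insertBy_mid {α : Type} (before : α → α → Bool) (x : α) (A B : List α)
    (hA : ∀ y ∈ A, before x y = false) (hB : ∀ y ∈ B, before x y = true) :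
    PySem.List.insertBy before x (A ++ B) = A ++ x :: B := by
  induction A with
  | nil =>
    cases B with
    | nil => simp [PySem.List.insertBy]
    | cons b bs => simp [PySem.List.insertBy, hB b (by simp)]
  | cons a as ih =>
    have ha := hA a (by simp)
    simp only [List.cons_append, PySem.List.insertBy, ha]
    simp [ih (fun y hy => hA y (by simp [hy]))]

-- the stable sort by a 0/1-valued key is the stable two-bucket partition (the two filters)
theorem pv_foldl_insertBy_partition {α : Type} (f : α → Int)
    (hf : ∀ x, f x = 0 ∨ f x = 1) :
    ∀ (xs : List α) (A B : List α), (∀ y ∈ A, f y = 0) → (∀ y ∈ B, f y = 1) →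
      xs.foldl (fun acc x => PySem.List.insertBy (fun a b => decide (f a < f b)) x acc) (A ++ B)
        = (A ++ xs.filter (fun x => f x = 0)) ++ (B ++ xs.filter (fun x => ¬ f x = 0)) := by
  intro xs
  induction xs with
  | nil => intro A B _ _; simp
  | cons x xs ih =>
    intro A B hA hB
    rcases hf x with h0 | h1
    · have hins : PySem.List.insertBy (fun a b => decide (f a < f b)) x (A ++ B) = A ++ x :: B := by
        apply pv_insertBy_mid
        · intro y hy; simp [h0, hA y hy]
        · intro y hy; simp [h0, hB y hy]
      have : A ++ x :: B = (A ++ [x]) ++ B := by simp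
      rw [List.foldl_cons, hins, this,
        ih (A ++ [x]) B (by intro y hy; rcases List.mem_append.1 hy with h | h;
                            exact hA y h; simp at h; simp [h, h0]) hB]
      simp [h0]
    · have hins : PySem.List.insertBy (fun a b => decide (f a < f b)) x (A ++ B) = (A ++ B) ++ x :: [] := by
        have := pv_insertBy_mid (fun a b => decide (f a < f b)) x (A ++ B) []
          (by intro y hy
              rcases List.mem_append.1 hy with h | h
              · simp [h1, hA y h]
              · simp [h1, hB y h])
          (by intro y hy; simp at hy)
        simpa using this
      have : (A ++ B) ++ [x] = A ++ (B ++ [x]) := by simp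
      rw [List.foldl_cons, hins, this,
        ih A (B ++ [x]) hA (by intro y hy; rcases List.mem_append.1 hy with h | h;
                                exact hB y h; simp at h; simp [h, h1])]
      have hx0 : ¬ f x = 0 := by omega
      simp [hx0]

theorem pvPrio_zero_or_one (url : String) : pvPrio url = 0 ∨ pvPrio url = 1 := by
  unfold pvPrio; split <;> simp

-- A's (seen-set, output-list) fold over any list, started at (d.keys, d.values), computes the
-- values of B's first-record dict fold started at d (keys nodup).
theorem pv_setfold_eq_dictfold (xs : List (List (String × String)))
    (d : PySem.Dict (List Char) (List (String × String))) (hnd : d.keys.Nodup) :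
    (xs.foldl
      (fun (st : PySem.Set (List Char) × List (List (String × String))) r =>
        let url := pvNorm (pvGetUrl r)
        if url ≠ [] ∧ ¬ st.1.contains url = true then (st.1.add url, st.2 ++ [r]) else st)
      (d.keys, d.values)).2
    = (xs.foldl
        (fun (d' : PySem.Dict (List Char) (List (String × String))) r =>
          let k := pvNorm (pvGetUrl r)
          if k ≠ [] ∧ ¬ d'.contains k = true then d'.insert k r else d')
        d).values := by
  induction xs generalizing d with
  | nil => simp
  | cons r xs ih =>
    simp only [List.foldl_cons]
    by_cases hc : pvNorm (pvGetUrl r) ≠ [] ∧ ¬ d.contains (pvNorm (pvGetUrl r)) = true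
    · have hnc : d.contains (pvNorm (pvGetUrl r)) = false := by simpa using hc.2
      have hmem : pvNorm (pvGetUrl r) ∉ d.keys := by
        simpa [PySem.Dict.contains_eq_decide_mem_keys] using hnc
      have hkeys : PySem.Set.add d.keys (pvNorm (pvGetUrl r)) = (d.insert (pvNorm (pvGetUrl r)) r).keys := by
        rw [PySem.Dict.keys_insert_of_not_contains d r hnc]
        simp [PySem.Set.add, hmem]
      have hcontains : PySem.Set.contains d.keys (pvNorm (pvGetUrl r)) = d.contains (pvNorm (pvGetUrl r)) := by
        simp [PySem.Set.contains, PySem.Dict.contains_eq_decide_mem_keys]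
      have hvals : d.values ++ [r] = (d.insert (pvNorm (pvGetUrl r)) r).values := by
        have := PySem.Dict.items_insert_of_not_contains d r hnc
        unfold PySem.Dict.values
        rw [this]; simp
      simp only [hcontains]
      rw [if_pos hc, if_pos hc, hkeys, hvals]
      exact ih _ (PySem.Dict.nodup_keys_insert d _ r hnd)
    · have hcontains : PySem.Set.contains d.keys (pvNorm (pvGetUrl r)) = d.contains (pvNorm (pvGetUrl r)) := by
        simp [PySem.Set.contains, PySem.Dict.contains_eq_decide_mem_keys]
      simp only [hcontains]
      rw [if_neg hc, if_neg hc]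
      exact ih d hnd

-- ===== VERDICT (by name: the statement is the Claim_ definition above) =====
theorem deduplicate_jobs_spec : Claim_equal_deduplicate_jobs := by
  intro results _
  unfold Spec_deduplicate_jobs deduplicate_jobs deduplicate_jobs_alt
  rw [PySem.List.sorted_eq_foldl_insertBy]
  have hpart := pv_foldl_insertBy_partition (fun r : List (String × String) => pvPrio (pvGetUrl r))
    (fun r => pvPrio_zero_or_one _) results [] [] (by simp) (by simp)
  simp only [List.nil_append] at hpart
  rw [hpart]
  have := pv_setfold_eq_dictfold
    (results.filter (fun r : List (String × String) => pvPrio (pvGetUrl r) = 0)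
      ++ results.filter (fun r : List (String × String) => ¬ pvPrio (pvGetUrl r) = 0))
    PySem.Dict.empty (by simp [PySem.Dict.keys_empty])
  simpa using this
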